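-- pv_equiv track=rewrite | github.com/yuzhenpeng/TOGA | split_exon_realign_jobs.py | fill_buckets
-- ===== SOURCE A (Python) =====
-- def fill_buckets(buckets, all_jobs):
--     """Split jobs in buckets according their memory consumption."""
--     if 0 in buckets.keys():  # do not split it
--         buckets[0] = list(all_jobs.keys())
--         return buckets
--     # buckets were set
--     memlims = sorted(buckets.keys())
--     prev_lim = 0
--     for memlim in memlims:
--         buckets[memlim] = [job for job, jobmem in all_jobs.items() if prev_lim < jobmem <= memlim]
--         prev_lim = memlim
--     # remove empty
--     filter_buckets = {k: v for k, v in buckets.items() if len(v) > 0}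
--     return filter_buckets
-- ===== SOURCE B (Python) =====
-- def _first_at_least(limits, mem):
--     """Index of the first element of sorted `limits` that is >= mem (binary search)."""
--     lo, hi = 0, len(limits)
--     while lo < hi:
--         mid = (lo + hi) // 2
--         if limits[mid] < mem:
--             lo = mid + 1
--         else:
--             hi = mid
--     return lo
--
--
-- def fill_buckets(buckets, all_jobs):
--     """Split jobs in buckets according their memory consumption."""
--     if 0 in buckets:  # do not split it
--         buckets[0] = list(all_jobs.keys())
--         return buckets
--     memlims = sorted(buckets)
--     assigned = {lim: [] for lim in memlims}
--     for job, jobmem in all_jobs.items():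
--         i = _first_at_least(memlims, jobmem)
--         if i == len(memlims) or (i == 0 and jobmem <= 0):
--             continue  # above every limit, or at/below the base limit 0
--         assigned[memlims[i]].append(job)
--     return {k: assigned[k] for k in buckets if assigned[k]}
-- ===== Notes on version B (the rewrite author's own statement) =====
-- stated objective: alternative
-- what changed: Instead of scanning all jobs once per bucket (a full filter of all_jobs for each memory limit), B makes a single pass over the jobs, binary-searching each job's memory into the sorted bucket limits, then emits the non-empty buckets in the dict's original key order.
import Mathlib
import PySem

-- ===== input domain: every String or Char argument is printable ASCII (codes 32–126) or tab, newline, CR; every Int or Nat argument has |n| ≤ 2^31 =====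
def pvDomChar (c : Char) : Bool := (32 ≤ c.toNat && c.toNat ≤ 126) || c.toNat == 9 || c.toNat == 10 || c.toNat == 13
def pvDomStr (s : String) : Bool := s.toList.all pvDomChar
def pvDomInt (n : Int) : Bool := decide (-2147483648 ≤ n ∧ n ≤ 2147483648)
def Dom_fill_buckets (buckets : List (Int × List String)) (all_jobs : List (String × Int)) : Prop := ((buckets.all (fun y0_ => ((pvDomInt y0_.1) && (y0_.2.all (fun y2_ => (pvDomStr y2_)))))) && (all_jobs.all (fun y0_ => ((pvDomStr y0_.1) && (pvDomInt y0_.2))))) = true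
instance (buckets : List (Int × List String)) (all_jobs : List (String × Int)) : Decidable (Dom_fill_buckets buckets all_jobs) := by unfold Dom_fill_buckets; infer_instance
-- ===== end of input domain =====

-- B replaces A's per-bucket full scans of all_jobs by one pass over the jobs with a binary search
-- into the sorted limits (objective: alternative). Return-value equivalence only: Python A reassigns
-- values inside the caller's `buckets` dict before building its fresh result; B only mutates it
-- (identically) in the `0 in buckets` branch.

-- ===== PORT A =====
-- the dict parameters arrive as association lists; each port first forms the Python dict from them
def fill_buckets (buckets : List (Int × List String)) (all_jobs : List (String × Int)) : List (Int × List String) :=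
  let bk := PySem.Dict.ofList buckets
  let aj := PySem.Dict.ofList all_jobs
  if bk.contains 0 then (bk.insert 0 aj.keys).items
  else
    -- memlims = sorted(buckets.keys()); loop threading prev_lim, overwriting buckets[memlim]
    let memlims := PySem.List.sorted bk.keys (fun x => x) false
    let final := memlims.foldl
      (fun (st : PySem.Dict Int (List String) × Int) memlim =>
        (st.1.insert memlim
          ((aj.items.filter (fun q => decide (st.2 < q.2 ∧ q.2 ≤ memlim))).map (fun q => q.1)),
         memlim))
      (bk, 0)
    -- filter_buckets = {k: v for k, v in buckets.items() if len(v) > 0}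
    ((final.1.items.filter (fun q => decide (0 < q.2.length))).foldl
      (fun (d : PySem.Dict Int (List String)) q => d.insert q.1 q.2) PySem.Dict.empty).items

-- ===== PORT B =====
-- while lo < hi: mid = (lo+hi)//2; if limits[mid] < mem: lo = mid+1 else: hi = mid  (index always in range)
def firstAtLeast (limits : List Int) (mem : Int) (lo hi : Nat) : Nat :=
  if h : lo < hi then
    let mid := (lo + hi) / 2
    if limits.getD mid 0 < mem then firstAtLeast limits mem (mid + 1) hi
    else firstAtLeast limits mem lo mid
  else lo
termination_by hi - lo
decreasing_by all_goals omega

def fill_buckets_alt (buckets : List (Int × List String)) (all_jobs : List (String × Int)) : List (Int × List String) :=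
  let bk := PySem.Dict.ofList buckets
  let aj := PySem.Dict.ofList all_jobs
  if bk.contains 0 then (bk.insert 0 aj.keys).items
  else
    let memlims := PySem.List.sorted bk.keys (fun x => x) false
    -- assigned = {lim: [] for lim in memlims}
    let assigned0 := memlims.foldl
      (fun (d : PySem.Dict Int (List String)) lim => d.insert lim ([] : List String))
      PySem.Dict.empty
    -- one pass over the jobs: binary-search each job's memory into memlims
    let assigned := aj.items.foldl
      (fun (d : PySem.Dict Int (List String)) p =>
        let i := firstAtLeast memlims p.2 0 memlims.length
        if i = memlims.length ∨ (i = 0 ∧ p.2 ≤ 0) then d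
        else d.modify (memlims.getD i 0) [] (fun v => v ++ [p.1]))
      assigned0
    -- {k: assigned[k] for k in buckets if assigned[k]}: bk.keys is duplicate-free, so the
    -- comprehension's items are exactly the kept pairs in bk's key order
    bk.keys.foldl
      (fun (out : List (Int × List String)) k =>
        if assigned.getD k [] ≠ [] then out ++ [(k, assigned.getD k [])] else out) []

-- ===== PRECONDITION & SPEC =====
def Spec_fill_buckets (buckets : List (Int × List String)) (all_jobs : List (String × Int)) (out : List (Int × List String)) : Prop := out = fill_buckets_alt buckets all_jobs
instance (buckets : List (Int × List String)) (all_jobs : List (String × Int)) (out : List (Int × List String)) : Decidable (Spec_fill_buckets buckets all_jobs out) := by unfold Spec_fill_buckets; infer_instance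

-- ===== CLAIM (what is proved, stated in full; the proofs are below) =====
def Claim_equal_fill_buckets : Prop := ∀ (buckets : List (Int × List String)) (all_jobs : List (String × Int)), Dom_fill_buckets buckets all_jobs → Spec_fill_buckets buckets all_jobs (fill_buckets buckets all_jobs)

-- ===== LEMMAS AND PROOFS =====

-- binary search is the first index holding a value ≥ mem (invariant form)
theorem firstAtLeast_spec (L : List Int) (m : Int) (hs : L.Pairwise (· ≤ ·)) :
    ∀ (n lo hi : Nat), hi - lo ≤ n → hi ≤ L.length → lo ≤ hi →
    (∀ j (_ : j < L.length), j < lo → L[j] < m) →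
    (∀ j (_ : j < L.length), hi ≤ j → m ≤ L[j]) →
    firstAtLeast L m lo hi ≤ L.length ∧
      (∀ j (_ : j < L.length), j < firstAtLeast L m lo hi → L[j] < m) ∧
      (∀ j (_ : j < L.length), firstAtLeast L m lo hi ≤ j → m ≤ L[j]) := by
  have mono : ∀ p q (hp : p < L.length) (hq : q < L.length), p ≤ q → L[p] ≤ L[q] := by
    intro p q hp hq hpq
    rcases Nat.lt_or_ge p q with h | h
    · exact (List.pairwise_iff_getElem.mp hs) p q hp hq h
    · have : p = q := Nat.le_antisymm hpq h
      subst this; exact le_refl _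
  intro n
  induction n with
  | zero =>
    intro lo hi hn hhi hlh hlow hhigh
    have : lo = hi := by omega
    subst this
    rw [firstAtLeast]
    simp only [lt_irrefl, dite_false]
    exact ⟨by omega, hlow, hhigh⟩
  | succ n ih =>
    intro lo hi hn hhi hlh hlow hhigh
    rw [firstAtLeast]
    by_cases h : lo < hi
    · simp only [h, dite_true]
      have hmid : (lo + hi) / 2 < hi := by omega
      have hmidlo : lo ≤ (lo + hi) / 2 := by omega
      have hmlen : (lo + hi) / 2 < L.length := by omega
      rw [List.getD_eq_getElem L 0 hmlen]
      by_cases hcmp : L[(lo + hi) / 2] < m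
      · simp only [hcmp, if_true]
        exact ih ((lo + hi) / 2 + 1) hi (by omega) hhi (by omega)
          (fun j hj hjlt => lt_of_le_of_lt (mono j ((lo+hi)/2) hj hmlen (by omega)) hcmp)
          hhigh
      · simp only [hcmp, if_false]
        exact ih lo ((lo + hi) / 2) (by omega) (by omega) (by omega)
          hlow
          (fun j hj hjge => le_trans (not_lt.mp hcmp) (mono ((lo+hi)/2) j hmlen hj hjge))
    · have : lo = hi := by omega
      subst this
      simp only [h, dite_false]
      exact ⟨by omega, hlow, hhigh⟩

-- threading prev_lim through A's loop = folding over (0 :: L).zip L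
theorem threadA (aj : List (String × Int)) :
    ∀ (L : List Int) (d : PySem.Dict Int (List String)) (p : Int),
    (L.foldl (fun st memlim =>
        (st.1.insert memlim
          ((aj.filter (fun q => decide (st.2 < q.2 ∧ q.2 ≤ memlim))).map (fun q => q.1)),
         memlim)) (d, p)).1
      = ((p :: L).zip L).foldl (fun dd q =>
          dd.insert q.2 ((aj.filter (fun qq => decide (q.1 < qq.2 ∧ qq.2 ≤ q.2))).map (fun qq => qq.1))) d := by
  intro L
  induction L with
  | nil => intro d p; rfl
  | cons l ls ih =>
    intro d p
    simp only [List.foldl_cons, List.zip_cons_cons]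
    exact ih (d.insert l ((aj.filter (fun q => decide (p < q.2 ∧ q.2 ≤ l))).map (fun q => q.1))) l

-- a fold of inserts at distinct existing keys rewrites the items in place
theorem items_insert_loop (aj : List (String × Int)) :
    ∀ (Z : List (Int × Int)) (d : PySem.Dict Int (List String)),
    (Z.map (·.2)).Nodup → (∀ q ∈ Z, d.contains q.2 = true) →
    (Z.foldl (fun dd q =>
        dd.insert q.2 ((aj.filter (fun qq => decide (q.1 < qq.2 ∧ qq.2 ≤ q.2))).map (fun qq => qq.1))) d).items
      = d.items.map (fun r =>
          ((Z.map (fun q => (q.2, q.1))).lookup r.1).elim r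
            (fun pv => (r.1, (aj.filter (fun q => decide (pv < q.2 ∧ q.2 ≤ r.1))).map (fun q => q.1)))) := by
  intro Z
  induction Z with
  | nil => intro d _ _; simp
  | cons q Z' ih =>
    intro d hnd hcont
    rw [List.map_cons, List.nodup_cons] at hnd
    obtain ⟨hq2, hnd'⟩ := hnd
    have hcont' : ∀ r ∈ Z',
        (d.insert q.2 ((aj.filter (fun qq => decide (q.1 < qq.2 ∧ qq.2 ≤ q.2))).map (fun qq => qq.1))).contains r.2 = true := by
      intro r hr
      rw [PySem.Dict.contains_insert]
      simp [hcont r (List.mem_cons_of_mem _ hr)]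
    simp only [List.foldl_cons]
    rw [ih (d.insert q.2 ((aj.filter (fun qq => decide (q.1 < qq.2 ∧ qq.2 ≤ q.2))).map (fun qq => qq.1))) hnd' hcont']
    rw [PySem.Dict.items_insert_of_contains d _ (hcont q (List.mem_cons_self))]
    rw [List.map_map]
    apply List.map_congr_left
    intro r _
    by_cases hk : r.1 = q.2
    · simp only [Function.comp, hk, beq_self_eq_true, if_true, List.map_cons, List.lookup_cons]
      have : (Z'.map (fun q => (q.2, q.1))).lookup q.2 = none := by
        rw [List.lookup_eq_none_iff]
        intro p hp
        rcases List.mem_map.mp hp with ⟨r, hr, hrp⟩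
        have : p.1 = r.2 := by rw [← hrp]
        simp only [this, bne_iff_ne, ne_eq]
        intro hq
        exact hq2 (List.mem_map.mpr ⟨r, hr, hq.symm⟩)
      simp [this]
    · simp only [Function.comp, List.map_cons, List.lookup_cons]
      have hbeq : (r.1 == q.2) = false := by simpa using hk
      simp [hbeq]

-- looking up the t-th key of a duplicate-free zip
theorem lookup_zip (L M : List Int) (t : Nat) (ht : t < L.length) (hM : L.length ≤ M.length)
    (hnd : L.Nodup) : (L.zip M).lookup L[t] = some (M[t]'(by omega)) := by
  induction L generalizing M t with
  | nil => simp at ht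
  | cons l ls ih =>
    cases M with
    | nil => simp at hM
    | cons m ms =>
      cases t with
      | zero => simp
      | succ s =>
        have hs : s < ls.length := by simpa using ht
        have hne : (ls[s] == l) = false := by
          have : ls[s] ≠ l := fun h => (List.nodup_cons.mp hnd).1 (h ▸ List.getElem_mem hs)
          simpa using this
        simp only [List.zip_cons_cons, List.getElem_cons_succ, List.lookup_cons, hne]
        exact ih ms s hs (by simpa using hM) (List.nodup_cons.mp hnd).2

theorem getD_init : ∀ (L : List Int) (d : PySem.Dict Int (List String)),
    (∀ k, d.getD k [] = []) → ∀ k,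
    (L.foldl (fun r lim => r.insert lim ([] : List String)) d).getD k [] = [] := by
  intro L
  induction L with
  | nil => intro d h k; exact h k
  | cons l ls ih =>
    intro d h k
    simp only [List.foldl_cons]
    refine ih _ (fun k' => ?_) k
    rw [PySem.Dict.getD_insert]
    split <;> simp [h]

-- one pass over the jobs: what each bucket of B's `assigned` dict collects
theorem getD_scatter (L : List Int) :
    ∀ (l : List (String × Int)) (d : PySem.Dict Int (List String)) (k : Int),
    (l.foldl (fun d p =>
        let i := firstAtLeast L p.2 0 L.length
        if i = L.length ∨ (i = 0 ∧ p.2 ≤ 0) then d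
        else d.modify (L.getD i 0) [] (fun v => v ++ [p.1])) d).getD k []
      = d.getD k [] ++ ((l.filter (fun p =>
          let i := firstAtLeast L p.2 0 L.length
          !decide (i = L.length ∨ (i = 0 ∧ p.2 ≤ 0)) && (L.getD i 0 == k))).map (fun p => p.1)) := by
  intro l
  induction l with
  | nil => intro d k; simp
  | cons p l ih =>
    intro d k
    simp only [List.foldl_cons, List.filter_cons]
    by_cases hc : firstAtLeast L p.2 0 L.length = L.length ∨ (firstAtLeast L p.2 0 L.length = 0 ∧ p.2 ≤ 0)
    · rw [if_pos hc, ih]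
      simp [hc]
    · rw [if_neg hc, ih, PySem.Dict.getD_modify]
      by_cases hk : L[firstAtLeast L p.2 0 L.length]?.getD 0 = k
      · have hk' : k = L[firstAtLeast L p.2 0 L.length]?.getD 0 := hk.symm
        simp [List.getD, hc, hk]
      · have hk' : ¬ (k = L[firstAtLeast L p.2 0 L.length]?.getD 0) := fun h => hk h.symm
        simp [List.getD, hc, hk, hk']

-- CORE: membership in A's interval (prev_lim, memlim] = B's binary-searched bucket
theorem core_iff (L : List Int) (hlt : L.Pairwise (· < ·)) (t : Nat) (ht : t < L.length) (m : Int)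
    (i : Nat) (hi_le : i ≤ L.length)
    (hlow : ∀ j (_ : j < L.length), j < i → L[j] < m)
    (hhigh : ∀ j (_ : j < L.length), i ≤ j → m ≤ L[j]) :
    ((0 :: L).getD t 0 < m ∧ m ≤ L[t]) ↔
      (¬(i = L.length ∨ (i = 0 ∧ m ≤ 0)) ∧ L.getD i 0 = L[t]) := by
  have smono : ∀ p q (hp : p < L.length) (hq : q < L.length), p < q → L[p] < L[q] :=
    fun p q hp hq hpq => (List.pairwise_iff_getElem.mp hlt) p q hp hq hpq
  have lemono : ∀ p q (hp : p < L.length) (hq : q < L.length), p ≤ q → L[p] ≤ L[q] := by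
    intro p q hp hq hpq
    rcases Nat.lt_or_ge p q with h | h
    · exact le_of_lt (smono p q hp hq h)
    · have : p = q := by omega
      subst this; exact le_refl _
  have hprev : ∀ (s : Nat), s < L.length →
      (0 :: L).getD s 0 = if s = 0 then (0 : Int) else L.getD (s-1) 0 := by
    intro s hs
    cases s with
    | zero => rfl
    | succ u => simp [List.getD]
  constructor
  · rintro ⟨h1, h2⟩
    have hit : i = t := by
      by_contra hne
      rcases Nat.lt_or_ge i t with h | h
      · have him : m ≤ L[i]'(by omega) := hhigh i (by omega) (le_refl _)
        have ht0 : ¬ t = 0 := by omega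
        rw [hprev _ ht, if_neg ht0, List.getD_eq_getElem L 0 (show t-1 < L.length by omega)] at h1
        have hle2 : L[i]'(by omega) ≤ L[t-1]'(by omega) :=
          lemono i (t-1) (by omega) (by omega) (by omega)
        omega
      · rcases Nat.lt_or_ge t i with h' | h'
        · exact absurd (hlow t ht h') (by omega)
        · omega
    subst hit
    refine ⟨?_, by rw [List.getD_eq_getElem L 0 ht]⟩
    push Not
    refine ⟨by omega, fun h0 => ?_⟩
    rw [hprev _ ht, if_pos h0] at h1
    omega
  · rintro ⟨hne, heq⟩
    push Not at hne
    obtain ⟨hne1, hne2⟩ := hne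
    have hi_lt : i < L.length := by omega
    rw [List.getD_eq_getElem L 0 hi_lt] at heq
    have hit : i = t := by
      by_contra hnet
      rcases Nat.lt_or_ge i t with h | h
      · exact absurd heq (ne_of_lt (smono i t hi_lt ht h))
      · have : t < i := by omega
        exact absurd heq (ne_of_gt (smono t i ht hi_lt this))
    subst hit
    have h2 : m ≤ L[i] := hhigh i hi_lt (le_refl _)
    refine ⟨?_, h2⟩
    rw [hprev _ hi_lt]
    rcases Nat.eq_zero_or_pos i with h0 | hpos
    · rw [h0, if_pos rfl]
      exact hne2 h0
    · rw [if_neg (by omega : ¬ i = 0), List.getD_eq_getElem L 0 (show i-1 < L.length by omega)]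
      exact hlow (i-1) (by omega) (by omega)

-- B's conditional-append loop over the keys is a filter-and-map
theorem bfold (A : Int → List String) :
    ∀ (ks : List Int) (acc : List (Int × List String)),
    ks.foldl (fun out k => if A k ≠ [] then out ++ [(k, A k)] else out) acc
      = acc ++ (ks.filter (fun k => decide (A k ≠ []))).map (fun k => (k, A k)) := by
  intro ks
  induction ks with
  | nil => intro acc; simp
  | cons k ks ih =>
    intro acc
    simp only [List.foldl_cons, List.filter_cons]
    by_cases hk : A k ≠ []
    · rw [if_pos hk, ih]
      simp [hk]
    · rw [if_neg hk, ih]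
      simp [hk]

-- len(v) > 0 filtering of the rewritten items = B's keep-nonempty comprehension over the keys
theorem filter_len_map (xs : List (Int × List String)) (V : Int → List String) :
    (xs.map (fun r => (r.1, V r.1))).filter (fun q => decide (0 < q.2.length))
      = ((xs.map (fun p => p.1)).filter (fun k => decide (V k ≠ []))).map (fun k => (k, V k)) := by
  induction xs with
  | nil => rfl
  | cons x xs ih =>
    simp only [List.map_cons, List.filter_cons]
    cases hV : V x.1 <;> simp [ih, hV]

-- ===== VERDICT (by name: the statement is the Claim_ definition above) =====
theorem fill_buckets_spec : Claim_equal_fill_buckets := by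
  intro buckets all_jobs _
  unfold Spec_fill_buckets
  simp only [fill_buckets, fill_buckets_alt]
  by_cases h0 : (PySem.Dict.ofList buckets : PySem.Dict Int (List String)).contains 0 = true
  · simp only [h0, if_true]
  · simp only [h0, if_false, Bool.false_eq_true]
    set bk : PySem.Dict Int (List String) := PySem.Dict.ofList buckets with hbk
    set aj : PySem.Dict String Int := PySem.Dict.ofList all_jobs with haj
    set L : List Int := PySem.List.sorted bk.keys (fun x => x) false with hLdef
    have hknd : bk.keys.Nodup := PySem.Dict.nodup_keys_ofList buckets
    have hperm : L.Perm bk.keys := PySem.List.sorted_perm _ _ _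
    have hLnd : L.Nodup := (List.Perm.nodup_iff hperm).mpr hknd
    have hle : L.Pairwise (· ≤ ·) := PySem.List.sorted_pairwise bk.keys (fun x => x)
    have hlt : L.Pairwise (· < ·) :=
      (hle.and hLnd).imp (fun h => lt_of_le_of_ne h.1 h.2)
    -- A side: thread prev_lim as a zip, rewrite the items in place
    rw [threadA]
    rw [items_insert_loop _ _ _
      (by rw [List.map_snd_zip (by simp)]; exact hLnd)
      (by
        intro q hq
        rw [PySem.Dict.contains_iff_mem_keys]
        refine hperm.mem_iff.mp ?_
        have : q.2 ∈ ((0 :: L).zip L).map (fun q => q.2) := List.mem_map_of_mem hq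
        rwa [List.map_snd_zip (by simp)] at this)]
    -- the final dict comprehension of A appends fresh distinct keys to an empty dict
    have hfst : ∀ (r : Int × List String),
        (((((0 :: L).zip L).map (fun q => (q.2, q.1))).lookup r.1).elim r
          (fun pv => (r.1, (aj.items.filter (fun q => decide (pv < q.2 ∧ q.2 ≤ r.1))).map (fun q => q.1)))).1 = r.1 := by
      intro r
      cases (((0 :: L).zip L).map (fun q => (q.2, q.1))).lookup r.1 <;> rfl
    rw [PySem.Dict.items_foldl_insert_fresh _ _ _ _ (by intro a _; rfl)
      (by
        refine (List.filter_sublist.map _).nodup ?_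
        rw [List.map_map]
        simp only [Function.comp_def]
        rw [List.map_congr_left (fun r _ => hfst r)]
        exact hknd)]
    simp only [show (PySem.Dict.empty : PySem.Dict Int (List String)).items = [] from rfl,
      List.nil_append, Prod.mk.eta, List.map_id']
    -- B side: turn the conditional-append fold into filter-and-map
    rw [bfold]
    simp only [List.nil_append]
    have hV : ∀ k, (aj.items.foldl (fun d p =>
        let i := firstAtLeast L p.2 0 L.length
        if i = L.length ∨ (i = 0 ∧ p.2 ≤ 0) then d
        else d.modify (L.getD i 0) [] (fun v => v ++ [p.1]))
        (L.foldl (fun r lim => r.insert lim ([] : List String)) PySem.Dict.empty)).getD k []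
        = (aj.items.filter (fun p =>
            !decide (firstAtLeast L p.2 0 L.length = L.length ∨
              (firstAtLeast L p.2 0 L.length = 0 ∧ p.2 ≤ 0)) &&
            (L.getD (firstAtLeast L p.2 0 L.length) 0 == k))).map (fun p => p.1) := by
      intro k
      rw [getD_scatter, getD_init _ _ (fun k' => PySem.Dict.getD_empty _ _), List.nil_append]
    simp only [hV]
    have hkeys : bk.keys = bk.items.map (fun p => p.1) := rfl
    rw [hkeys]
    rw [← filter_len_map bk.items (fun k => (aj.items.filter (fun p =>
        !decide (firstAtLeast L p.2 0 L.length = L.length ∨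
          (firstAtLeast L p.2 0 L.length = 0 ∧ p.2 ≤ 0)) &&
        (L.getD (firstAtLeast L p.2 0 L.length) 0 == k))).map (fun p => p.1))]
    -- finally: rewrite A's interval filter into B's binary-search filter, key by key
    refine congrArg (List.filter _) (List.map_congr_left ?_)
    intro r hr
    have hrk : r.1 ∈ bk.keys := hkeys ▸ List.mem_map_of_mem hr
    have hrL : r.1 ∈ L := hperm.mem_iff.mpr hrk
    obtain ⟨t, ht, hteq⟩ := List.mem_iff_getElem.mp hrL
    have hsw : (fun q : Int × Int => (q.2, q.1)) = Prod.swap := rfl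
    have hlook : (((0 :: L).zip L).map (fun q => (q.2, q.1))).lookup r.1 = some ((0 :: L)[t]'(by simp; omega)) := by
      rw [hsw, List.zip_swap, ← hteq]
      exact lookup_zip L (0 :: L) t ht (by simp) hLnd
    rw [hlook]
    simp only [Option.elim_some]
    refine congrArg (fun l => ((r.1 : Int), l.map (fun q : String × Int => q.1))) (List.filter_congr ?_)
    intro q _
    obtain ⟨h1s, h2s, h3s⟩ := firstAtLeast_spec L q.2 hle L.length 0 L.length (by omega)
      (le_refl _) (by omega) (by omega) (fun j hj hge => absurd hj (by omega))
    have hiff := core_iff L hlt t ht q.2 _ h1s h2s h3s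
    rw [List.getD_eq_getElem (0 :: L) 0 (by simp; omega)] at hiff
    rw [Bool.eq_iff_iff]
    simp only [decide_eq_true_eq, Bool.and_eq_true, Bool.not_eq_true', decide_eq_false_iff_not,
      beq_iff_eq]
    rw [← hteq]
    exact hiff
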